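-- pv_equiv track=rewrite | github.com/ASSERT-KTH/Mokav | experiments/pynguin/c4b/return-lst/generated_tests/src_2351/2/src_2351.py | func
-- ===== SOURCE A (Python) =====
-- def func(*args):
-- 	ret_values = []
--
-- 	x = int(args[0])
-- 	c = 0
-- 	for i in range(1, x):
-- 	    if ((i % 2) == 0):
-- 	        if (((x - i) % 2) == 0):
-- 	            ret_values.append('YES')
-- 	            c += 1
-- 	            break
-- 	if (c == 0):
-- 	    ret_values.append('NO')
--
-- 	return ret_values
-- ===== SOURCE B (Python) =====
-- def func(*args):
--     x = int(args[0])
--     return ['YES' if x >= 4 and x % 2 == 0 else 'NO']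
-- ===== Notes on version B (the rewrite author's own statement) =====
-- stated objective: faster
-- what changed: Replaced the O(x) scan for an even i with even x-i by the closed-form parity test: such a split exists iff x is even and x >= 4.
import Mathlib
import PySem

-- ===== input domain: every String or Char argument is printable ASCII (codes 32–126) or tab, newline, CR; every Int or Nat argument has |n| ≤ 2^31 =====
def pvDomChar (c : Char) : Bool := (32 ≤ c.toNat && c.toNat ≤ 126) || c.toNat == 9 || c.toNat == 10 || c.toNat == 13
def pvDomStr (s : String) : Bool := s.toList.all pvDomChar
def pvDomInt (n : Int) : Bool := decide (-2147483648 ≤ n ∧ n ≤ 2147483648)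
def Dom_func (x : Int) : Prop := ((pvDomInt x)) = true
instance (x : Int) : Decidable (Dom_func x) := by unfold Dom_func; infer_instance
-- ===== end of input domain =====

-- B replaces A's O(x) scan with the closed-form parity test (x even and x ≥ 4): asymptotically faster.

-- ===== PORT A =====
-- A's for-loop with break: structural recursion over range(1, x), returning (ret_values, c)
def funcLoop (x : Int) : List Int → List String × Int
  | [] => ([], 0)
  | i :: rest =>
    if PySem.Int.mod i 2 == 0 then
      if PySem.Int.mod (x - i) 2 == 0 then (["YES"], 1)
      else funcLoop x rest
    else funcLoop x rest

def func (x : Int) : List String :=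
  let p := funcLoop x (PySem.List.pyRange 1 x 1)
  if p.2 == 0 then p.1 ++ ["NO"] else p.1

-- ===== PORT B =====
def func_alt (x : Int) : List String :=
  [if 4 ≤ x ∧ PySem.Int.mod x 2 == 0 then "YES" else "NO"]

-- ===== PRECONDITION & SPEC =====
def Spec_func (x : Int) (out : List String) : Prop := out = func_alt x
instance (x : Int) (out : List String) : Decidable (Spec_func x out) := by unfold Spec_func; infer_instance

-- ===== CLAIM (what is proved, stated in full; the proofs are below) =====
def Claim_equal_func : Prop := ∀ (x : Int), Dom_func x → Spec_func x (func x)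

-- ===== LEMMAS AND PROOFS =====

theorem pvMod2 (a : Int) : PySem.Int.mod a 2 = a % 2 :=
  PySem.Int.mod_eq_emod_of_pos (by omega)

-- if no i in the list satisfies the break condition, the loop ends with ([], 0)
theorem funcLoop_none (x : Int) (l : List Int)
    (h : ∀ i ∈ l, ¬(i % 2 = 0 ∧ (x - i) % 2 = 0)) : funcLoop x l = ([], 0) := by
  induction l with
  | nil => rfl
  | cons i rest ih =>
    have hi := h i (List.mem_cons_self)
    have hr : ∀ j ∈ rest, ¬(j % 2 = 0 ∧ (x - j) % 2 = 0) :=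
      fun j hj => h j (List.mem_cons_of_mem _ hj)
    simp only [funcLoop, pvMod2]
    by_cases h1 : i % 2 = 0
    · by_cases h2 : (x - i) % 2 = 0
      · exact absurd ⟨h1, h2⟩ hi
      · simp [h1, h2, ih hr]
    · simp [h1, ih hr]

theorem func_spec : Claim_equal_func := by
  intro x _
  unfold Spec_func func func_alt
  by_cases hyes : 4 ≤ x ∧ x % 2 = 0
  · obtain ⟨h4, he⟩ := hyes
    rw [PySem.List.pyRange_one_cons (by omega : (1:Int) < x)]
    norm_num
    rw [PySem.List.pyRange_one_cons (by omega : (2:Int) < x)]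
    have h2 : PySem.Int.mod (x - 2) 2 = 0 := by rw [pvMod2]; omega
    simp [funcLoop, he, h4]
  · have hno : ∀ i ∈ PySem.List.pyRange 1 x 1, ¬(i % 2 = 0 ∧ (x - i) % 2 = 0) := by
      intro i hi
      rw [PySem.List.mem_pyRange_one] at hi
      rintro ⟨h1, h2⟩
      exact hyes ⟨by omega, by omega⟩
    rw [funcLoop_none x _ hno]
    simp only [pvMod2]
    simp
    omega
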